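-- pv_equiv track=rewrite | github.com/gaplin/Advent_of_Code_2017 | 20/day20p2.py | get_sorted_difs
-- ===== SOURCE A (Python) =====
-- def get_sorted_difs(particles: dict) -> list:
--     result = []
--     for id1, p1 in particles.items():
--         for id2, p2 in particles.items():
--             if id1 == id2:
--                 continue
--             dist = abs(p1[0][0] - p2[0][0]) + abs(p1[0][1] - p2[0][1]) + abs(p1[0][2] - p2[0][2])
--             result.append(dist)
--
--     result.sort()
--     return result
-- ===== SOURCE B (Python) =====
-- def get_sorted_difs(particles: dict) -> list:
--     # Multiplicity map: distance -> how many ordered pairs have it; expand sorted keys.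
--     counts = {}
--     ps = list(particles.values())
--     while ps:
--         p, ps = ps[0], ps[1:]
--         for q in ps:
--             d = abs(p[0][0] - q[0][0]) + abs(p[0][1] - q[0][1]) + abs(p[0][2] - q[0][2])
--             counts[d] = counts.get(d, 0) + 2
--     out = []
--     for d in sorted(counts):
--         out.extend([d] * counts[d])
--     return out
-- ===== Notes on version B (the rewrite author's own statement) =====
-- stated objective: alternative
-- what changed: B replaces A's all-ordered-pairs list plus a comparison sort of n(n-1) elements by a counting approach: one pass over unordered pairs builds a distance->multiplicity dict (each pair counted with multiplicity 2), and the output is produced by sorting only the distinct distances and expanding each by its count.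
import Mathlib
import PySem

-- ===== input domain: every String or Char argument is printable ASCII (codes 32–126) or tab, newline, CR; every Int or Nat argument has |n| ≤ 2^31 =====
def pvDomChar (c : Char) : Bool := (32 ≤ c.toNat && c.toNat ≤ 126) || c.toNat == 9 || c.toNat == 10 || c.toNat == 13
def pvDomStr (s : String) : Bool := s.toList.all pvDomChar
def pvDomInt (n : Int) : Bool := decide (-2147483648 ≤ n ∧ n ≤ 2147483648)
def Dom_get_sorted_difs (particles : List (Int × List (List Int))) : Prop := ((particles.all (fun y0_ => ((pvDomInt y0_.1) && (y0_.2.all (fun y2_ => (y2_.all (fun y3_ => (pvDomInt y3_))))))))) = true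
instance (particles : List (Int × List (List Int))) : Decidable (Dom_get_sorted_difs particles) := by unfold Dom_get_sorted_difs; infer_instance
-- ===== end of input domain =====

-- B builds a distance -> multiplicity dict over unordered pairs (each pair counted 2) and
-- expands the sorted distinct distances by their counts, instead of A's sorted list of all
-- ordered-pair distances; objective: alternative.

-- ===== PORT A =====
-- p[0][i] for i = 0,1,2; exact wherever Pre_ holds (pyGet? is some there, so getD never fires)
def pvG (p : List (List Int)) (i : Int) : Int :=
  (PySem.List.pyGet? ((PySem.List.pyGet? p 0).getD []) i).getD 0

def pvDist (p1 p2 : List (List Int)) : Int :=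
  |pvG p1 0 - pvG p2 0| + |pvG p1 1 - pvG p2 1| + |pvG p1 2 - pvG p2 2|

def get_sorted_difs (particles : List (Int × List (List Int))) : List Int :=
  let items := (PySem.Dict.ofList particles).items
  let result := items.foldl (fun res p1 =>
      items.foldl (fun res p2 =>
        if p1.1 == p2.1 then res else res ++ [pvDist p1.2 p2.2]) res) ([] : List Int)
  PySem.List.sorted result (fun x => x) false

-- ===== PORT B =====
-- the 'while ps: p, ps = ps[0], ps[1:]' loop of Source B, filling the counts dict
def pvCntLoop : List (List (List Int)) → PySem.Dict Int Int → PySem.Dict Int Int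
  | [], c => c
  | p :: ps, c => pvCntLoop ps
      (ps.foldl (fun c q => c.insert (pvDist p q) (c.getD (pvDist p q) 0 + 2)) c)

def get_sorted_difs_alt (particles : List (Int × List (List Int))) : List Int :=
  let counts := pvCntLoop ((PySem.Dict.ofList particles).values) PySem.Dict.empty
  (PySem.List.sorted counts.keys (fun x => x) false).foldl
    (fun out d => out ++ PySem.List.pyRepeat [d] (counts.getD d 0)) []

-- ===== PRECONDITION & SPEC =====
-- Pre_ excludes exactly the inputs where Python A raises IndexError: some surviving dict value
-- is an empty list, or its first position row has fewer than 3 coordinates, while the dict has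
-- at least two entries (so the three coordinates of each value's first row are read).
def Pre_get_sorted_difs (particles : List (Int × List (List Int))) : Prop :=
  (PySem.Dict.ofList particles).size ≤ 1 ∨
    ∀ p ∈ (PySem.Dict.ofList particles).values, p ≠ [] ∧ 3 ≤ (p.headD []).length
instance (particles : List (Int × List (List Int))) : Decidable (Pre_get_sorted_difs particles) := by
  unfold Pre_get_sorted_difs; infer_instance

def pvWitness_get_sorted_difs : (List (Int × List (List Int))) :=
  [(0, [[0, 0, 0], [1, 1, 1]]), (1, [[3, -2, 5]])]

def Spec_get_sorted_difs (particles : List (Int × List (List Int))) (out : List Int) : Prop := out = get_sorted_difs_alt particles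
instance (particles : List (Int × List (List Int))) (out : List Int) : Decidable (Spec_get_sorted_difs particles out) := by unfold Spec_get_sorted_difs; infer_instance

-- ===== CLAIM (what is proved, stated in full; the proofs are below) =====
def Claim_equal_get_sorted_difs : Prop := ∀ (particles : List (Int × List (List Int))), Dom_get_sorted_difs particles → Pre_get_sorted_difs particles → Spec_get_sorted_difs particles (get_sorted_difs particles)

-- ===== LEMMAS AND PROOFS =====

-- each unordered pair's distance once (proof-side view of B's pair enumeration)
def pvPairsD : List (List (List Int)) → List Int
  | [] => []
  | p :: ps => ps.map (fun q => pvDist p q) ++ pvPairsD ps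

theorem pvDist_symm (p q : List (List Int)) : pvDist p q = pvDist q p := by
  simp [pvDist, abs_sub_comm]

-- the inner 'for id2' loop of A
theorem pv_inner_fold (l : List (Int × List (List Int))) (p1 : Int × List (List Int))
    (res : List Int) :
    l.foldl (fun res p2 => if p1.1 == p2.1 then res else res ++ [pvDist p1.2 p2.2]) res
      = res ++ (l.filter (fun p2 => !(p1.1 == p2.1))).map (fun p2 => pvDist p1.2 p2.2) := by
  induction l generalizing res with
  | nil => simp
  | cons a t ih =>
    simp only [List.foldl_cons]
    by_cases h : p1.1 = a.1
    · rw [if_pos (beq_iff_eq.mpr h), ih, List.filter_cons_of_neg (by simp [h])]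
    · rw [if_neg (by simp [h]), ih, List.filter_cons_of_pos (by simp [h])]
      simp

-- the outer 'for id1' loop of A
theorem pv_outer_fold (m l : List (Int × List (List Int))) (acc : List Int) :
    l.foldl (fun res p1 =>
        m.foldl (fun res p2 => if p1.1 == p2.1 then res else res ++ [pvDist p1.2 p2.2]) res) acc
      = acc ++ l.flatMap (fun p1 =>
          (m.filter (fun p2 => !(p1.1 == p2.1))).map (fun p2 => pvDist p1.2 p2.2)) := by
  induction l generalizing acc with
  | nil => simp
  | cons a t ih =>
    rw [List.foldl_cons, pv_inner_fold, ih, List.flatMap_cons, List.append_assoc]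

-- occurrences in a flatMap whose rows each start with one extra element
theorem pv_count_flatMap_cons {α : Type} (t : List α) (f : α → Int) (g : α → List Int)
    (x : Int) :
    (t.flatMap (fun p => f p :: g p)).count x
      = (t.map f).count x + (t.flatMap g).count x := by
  induction t with
  | nil => simp
  | cons a r ih =>
    simp only [List.flatMap_cons, List.map_cons, List.count_append, List.count_cons, ih]
    omega

-- A's unsorted multiset counts each unordered pair's distance exactly twice
theorem pv_main_count (l : List (Int × List (List Int))) (x : Int)
    (h : (l.map Prod.fst).Nodup) :
    (l.flatMap (fun p1 =>
        (l.filter (fun p2 => !(p1.1 == p2.1))).map (fun p2 => pvDist p1.2 p2.2))).count x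
      = 2 * (pvPairsD (l.map Prod.snd)).count x := by
  induction l with
  | nil => simp [pvPairsD]
  | cons a t ih =>
    simp only [List.map_cons, List.nodup_cons, List.mem_map] at h
    obtain ⟨ha, ht⟩ := h
    have hane : ∀ p2 ∈ t, a.1 ≠ p2.1 := fun p2 hp2 he => ha ⟨p2, hp2, he.symm⟩
    have hrow : t.filter (fun p2 => !(a.1 == p2.1)) = t := by
      rw [List.filter_eq_self]; intro p2 hp2; simp [hane p2 hp2]
    have hhead : (a :: t).filter (fun p2 => !(a.1 == p2.1)) = t := by
      rw [List.filter_cons_of_neg (by simp), hrow]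
    have hrows : t.flatMap (fun p1 =>
          ((a :: t).filter (fun p2 => !(p1.1 == p2.1))).map (fun p2 => pvDist p1.2 p2.2))
        = t.flatMap (fun p1 =>
            pvDist p1.2 a.2 :: (t.filter (fun p2 => !(p1.1 == p2.1))).map (fun p2 => pvDist p1.2 p2.2)) := by
      apply List.flatMap_congr
      intro p1 hp1
      have hne : ¬ (p1.1 = a.1) := fun he => (hane p1 hp1) he.symm
      rw [List.filter_cons_of_pos (by simp [hne]), List.map_cons]
    have hmm : ((t.map Prod.snd).map (fun q => pvDist a.2 q))
        = t.map (fun p2 => pvDist a.2 p2.2) := by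
      rw [List.map_map]; rfl
    have hsym : t.map (fun p1 => pvDist p1.2 a.2) = t.map (fun p2 => pvDist a.2 p2.2) :=
      List.map_congr_left (fun p1 _ => pvDist_symm p1.2 a.2)
    rw [List.flatMap_cons, List.count_append, hhead, hrows, pv_count_flatMap_cons, hsym,
        ih ht]
    simp only [List.map_cons, pvPairsD, List.count_append, hmm]
    omega

-- B's nested counting loop is the fold of the counter step over the once-per-pair list
theorem pv_cntLoop_eq (l : List (List (List Int))) (c : PySem.Dict Int Int) :
    pvCntLoop l c
      = (pvPairsD l).foldl (fun c d => c.insert d (c.getD d 0 + 2)) c := by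
  induction l generalizing c with
  | nil => simp [pvCntLoop, pvPairsD]
  | cons p ps ih =>
    rw [pvPairsD, List.foldl_append, List.foldl_map]
    exact ih _

-- counting-fold invariant: final count of a = initial count + 2 * occurrences
theorem pv_cnt_fold (P : List Int) (c : PySem.Dict Int Int) (a : Int) :
    (P.foldl (fun c d => c.insert d (c.getD d 0 + 2)) c).getD a 0
      = c.getD a 0 + 2 * (P.count a : Int) := by
  induction P generalizing c with
  | nil => simp
  | cons h t ih =>
    simp only [List.foldl_cons, ih, PySem.Dict.getD_insert, List.count_cons]
    by_cases hha : a = h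
    · simp only [hha, beq_self_eq_true]
      push_cast
      ring
    · simp [hha, Ne.symm hha]

-- expanding distinct keys by multiplicities: counts of the result
theorem pv_expand_count (K : List Int) (n : Int → Nat) (a : Int) (hnd : K.Nodup) :
    (K.flatMap (fun k => List.replicate (n k) k)).count a
      = if a ∈ K then n a else 0 := by
  induction K with
  | nil => simp
  | cons k t ih =>
    obtain ⟨hk, ht⟩ := List.nodup_cons.mp hnd
    by_cases hak : a = k
    · subst hak
      simp [List.count_append, ih ht, hk]
    · have hz : (List.replicate (n k) k).count a = 0 := by
        rw [List.count_eq_zero]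
        simp [List.mem_replicate, hak]
      simp [List.count_append, ih ht, hak, hz]

-- expanding keys in weakly increasing order yields a weakly increasing list
theorem pv_expand_pairwise (K : List Int) (n : Int → Nat)
    (h : K.Pairwise (· ≤ ·)) :
    (K.flatMap (fun k => List.replicate (n k) k)).Pairwise (· ≤ ·) := by
  induction K with
  | nil => simp
  | cons k t ih =>
    obtain ⟨hk, ht⟩ := List.pairwise_cons.mp h
    simp only [List.flatMap_cons]
    rw [List.pairwise_append]
    refine ⟨List.pairwise_replicate.mpr (Or.inr le_rfl), ih ht, ?_⟩
    intro x hx y hy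
    obtain rfl := List.eq_of_mem_replicate hx
    obtain ⟨k', hk', hy'⟩ := List.mem_flatMap.mp hy
    rw [List.eq_of_mem_replicate hy']
    exact hk k' hk'

-- ===== VERDICT (by name: the statement is the Claim_ definition above) =====
theorem get_sorted_difs_spec : Claim_equal_get_sorted_difs := by
  intro particles _ _
  unfold Spec_get_sorted_difs get_sorted_difs get_sorted_difs_alt
  simp only [pv_outer_fold, List.nil_append, PySem.List.pyRepeat_singleton,
    PySem.List.foldl_append_eq_flatMap, pv_cntLoop_eq]
  set items := (PySem.Dict.ofList particles).items with hitems
  have hvs_items : (PySem.Dict.ofList particles).values = items.map Prod.snd := rfl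
  set P := pvPairsD ((PySem.Dict.ofList particles).values) with hP
  set c := P.foldl (fun c d => c.insert d (c.getD d 0 + 2)) (PySem.Dict.empty : PySem.Dict Int Int) with hc
  -- keys of the counter
  have hkeys : c.keys = PySem.Set.ofList P := by
    rw [hc, PySem.Dict.keys_foldl_insert]
    rfl
  have hknd : c.keys.Nodup := by
    rw [hkeys]; exact PySem.Set.nodup_ofList P
  set SK := PySem.List.sorted c.keys (fun x => x) false with hSK
  have hSKnd : SK.Nodup := ((PySem.List.sorted_perm c.keys (fun x => x) false).nodup_iff).mpr hknd
  have hSKmem : ∀ a : Int, a ∈ SK ↔ a ∈ P := by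
    intro a
    rw [hSK, PySem.List.mem_sorted, hkeys, PySem.Set.mem_ofList]
  set B := SK.flatMap (fun d => List.replicate (c.getD d 0).toNat d) with hB
  -- counts of B's output
  have hBcount : ∀ a : Int, B.count a = 2 * P.count a := by
    intro a
    rw [hB, pv_expand_count SK (fun d => (c.getD d 0).toNat) a hSKnd]
    by_cases haP : a ∈ P
    · rw [if_pos ((hSKmem a).mpr haP), hc, pv_cnt_fold]
      simp only [PySem.Dict.getD_empty]
      omega
    · rw [if_neg (fun hmem => haP ((hSKmem a).mp hmem)),
        List.count_eq_zero_of_not_mem haP]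
  -- B's output is a permutation of A's unsorted list
  set L := items.flatMap (fun p1 =>
      (items.filter (fun p2 => !(p1.1 == p2.1))).map (fun p2 => pvDist p1.2 p2.2)) with hL
  have hperm : B.Perm L := by
    rw [List.perm_iff_count]
    intro a
    rw [hBcount a, hL,
      pv_main_count items a (PySem.Dict.nodup_keys_ofList particles), ← hvs_items]
  -- B's output is weakly increasing
  have hpair : B.Pairwise (· ≤ ·) := by
    rw [hB]
    refine pv_expand_pairwise SK _ ?_
    have := PySem.List.sorted_pairwise c.keys (fun x => x)
    simpa using this
  exact PySem.List.sorted_id_eq_of_perm_of_pairwise L B hperm hpair
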